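-- pv_equiv track=rewrite | github.com/ChristofferOhlsen/Safevibe | engine/report.py | _nl2br
-- ===== SOURCE A (Python) =====
-- def _escape_html(text: str) -> str:
--     if not text:
--         return ""
--     return (
--         str(text)
--         .replace("&", "&amp;")
--         .replace("<", "&lt;")
--         .replace(">", "&gt;")
--         .replace('"', "&quot;")
--         .replace("'", "&#39;")
--     )
--
-- def _nl2br(text: str) -> str:
--     """Konverter newlines til <br> og præserver indrykning."""
--     if not text:
--         return ""
--     lines = _escape_html(text).split("\n")
--     result = []
--     for line in lines:
--         stripped = line.lstrip()
--         spaces = len(line) - len(stripped)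
--         result.append("&nbsp;" * (spaces * 2) + stripped)
--     return "<br>".join(result)
-- ===== SOURCE B (Python) =====
-- def _esc(ch: str) -> str:
--     if ch == "&":
--         return "&amp;"
--     if ch == "<":
--         return "&lt;"
--     if ch == ">":
--         return "&gt;"
--     if ch == '"':
--         return "&quot;"
--     if ch == "'":
--         return "&#39;"
--     return ch
--
-- def _nl2br(text: str) -> str:
--     """Konverter newlines til <br> og præserver indrykning — single pass."""
--     parts = []
--     at_start = True
--     for ch in text:
--         if ch == "\n":
--             parts.append("<br>")
--             at_start = True
--         elif at_start and ch.isspace():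
--             parts.append("&nbsp;&nbsp;")
--         else:
--             parts.append(_esc(ch))
--             at_start = False
--     return "".join(parts)
-- ===== Notes on version B (the rewrite author's own statement) =====
-- stated objective: alternative
-- what changed: Replaces A's five whole-string replace passes plus split/lstrip/join with a single left-to-right pass over the characters that keeps an at-line-start flag, emitting <br> at newlines, &nbsp;&nbsp; per leading whitespace character, and the escaped character otherwise.
import Mathlib
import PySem

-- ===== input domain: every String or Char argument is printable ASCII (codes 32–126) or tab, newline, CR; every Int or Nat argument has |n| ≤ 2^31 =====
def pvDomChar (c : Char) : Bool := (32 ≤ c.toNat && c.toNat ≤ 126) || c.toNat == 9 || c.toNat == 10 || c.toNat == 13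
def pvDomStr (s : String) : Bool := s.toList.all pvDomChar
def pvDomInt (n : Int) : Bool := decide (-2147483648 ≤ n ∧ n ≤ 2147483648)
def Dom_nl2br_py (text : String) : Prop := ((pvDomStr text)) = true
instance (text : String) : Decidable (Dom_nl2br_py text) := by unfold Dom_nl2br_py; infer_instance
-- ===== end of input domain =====

-- B makes one pass over the characters with an at-line-start flag instead of A's escape/split/lstrip/join pipeline; same return value, no side effects.

-- ===== PORT A =====
-- helper: _escape_html, the chain of five str.replace calls
def escape_html_chars (cs : List Char) : List Char :=
  if cs = [] then []
  else
    PySem.Chars.replace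
      (PySem.Chars.replace
        (PySem.Chars.replace
          (PySem.Chars.replace
            (PySem.Chars.replace cs "&".toList "&amp;".toList)
            "<".toList "&lt;".toList)
          ">".toList "&gt;".toList)
        "\"".toList "&quot;".toList)
      "'".toList "&#39;".toList

def nl2br_py (text : String) : String :=
  if text.toList = [] then ""
  else
    let lines := PySem.Chars.splitOn (escape_html_chars text.toList) "\n".toList
    let result := lines.foldl (fun acc line =>
      let stripped := PySem.Chars.lstrip line
      let spaces : Int := (PySem.Chars.len line : Int) - (PySem.Chars.len stripped : Int)
      acc ++ [PySem.List.pyRepeat "&nbsp;".toList (spaces * 2) ++ stripped]) []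
    String.ofList (PySem.Chars.join "<br>".toList result)

-- ===== PORT B =====
-- helper: _esc, the early-return chain over one character
def escCh (c : Char) : List Char :=
  if c = '&' then "&amp;".toList
  else if c = '<' then "&lt;".toList
  else if c = '>' then "&gt;".toList
  else if c = '"' then "&quot;".toList
  else if c = '\'' then "&#39;".toList
  else [c]

-- the loop body: state = (parts, at_start)
def nl2brStep (st : List (List Char) × Bool) (ch : Char) : List (List Char) × Bool :=
  if ch = '\n' then (st.1 ++ ["<br>".toList], true)
  else if st.2 && PySem.Chars.isspace ch then (st.1 ++ ["&nbsp;&nbsp;".toList], true)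
  else (st.1 ++ [escCh ch], false)

def nl2br_py_alt (text : String) : String :=
  String.ofList (PySem.Chars.join [] (text.toList.foldl nl2brStep ([], true)).1)

-- ===== PRECONDITION & SPEC =====
def Spec_nl2br_py (text : String) (out : String) : Prop := out = nl2br_py_alt text
instance (text : String) (out : String) : Decidable (Spec_nl2br_py text out) := by unfold Spec_nl2br_py; infer_instance

-- ===== CLAIM (what is proved, stated in full; the proofs are below) =====
def Claim_equal_nl2br_py : Prop := ∀ (text : String), Dom_nl2br_py text → Spec_nl2br_py text (nl2br_py text)

-- ===== LEMMAS AND PROOFS =====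

-- s.replace(old, new) for a single-character old is a per-character flatMap
lemma replace_go_single (c : Char) (new : List Char) :
    ∀ (s : List Char) (fuel : Nat) (acc : List Char), s.length ≤ fuel →
      PySem.Chars.replace.go [c] new fuel s acc
        = acc.reverse ++ s.flatMap (fun d => if d = c then new else [d]) := by
  intro s
  induction s with
  | nil => intro fuel acc _; cases fuel <;> simp [PySem.Chars.replace.go]
  | cons d t ih =>
    intro fuel acc hle
    cases fuel with
    | zero => simp at hle
    | succ f =>
      rw [PySem.Chars.replace.go]
      by_cases hd : d = c
      · subst hd
        have hpre : List.isPrefixOf [d] (d :: t) = true := by simp [List.isPrefixOf]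
        rw [if_pos hpre]
        simp only [List.length_cons, List.length_nil, List.drop_succ_cons, List.drop_zero]
        rw [ih _ _ (by simpa using Nat.le_of_succ_le_succ hle)]
        simp
      · have hpre : List.isPrefixOf [c] (d :: t) = false := by
          simp [List.isPrefixOf]; exact fun h => (hd h.symm).elim
        rw [if_neg (by simp [hpre])]
        rw [ih _ _ (by simpa using Nat.le_of_succ_le_succ hle)]
        simp [hd]

lemma replace_single (c : Char) (new s : List Char) :
    PySem.Chars.replace s [c] new = s.flatMap (fun d => if d = c then new else [d]) := by
  rw [PySem.Chars.replace]
  simp only [List.isEmpty_cons, Bool.false_eq_true, if_false]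
  exact replace_go_single c new s s.length [] (le_refl _)

-- the whole escape chain is flatMap escCh
lemma escape_flatMap (cs : List Char) : escape_html_chars cs = cs.flatMap escCh := by
  rcases cs with _ | ⟨c, t⟩
  · simp [escape_html_chars]
  · rw [escape_html_chars]
    rw [if_neg (by simp)]
    show PySem.Chars.replace (PySem.Chars.replace (PySem.Chars.replace (PySem.Chars.replace
      (PySem.Chars.replace (c :: t) ['&'] "&amp;".toList) ['<'] "&lt;".toList) ['>'] "&gt;".toList)
      ['"'] "&quot;".toList) ['\''] "&#39;".toList = (c :: t).flatMap escCh
    rw [replace_single, replace_single, replace_single, replace_single, replace_single]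
    rw [List.flatMap_assoc, List.flatMap_assoc, List.flatMap_assoc, List.flatMap_assoc]
    apply List.flatMap_congr
    intro d _
    by_cases h1 : d = '&'
    · subst h1; decide
    by_cases h2 : d = '<'
    · subst h2; decide
    by_cases h3 : d = '>'
    · subst h3; decide
    by_cases h4 : d = '"'
    · subst h4; decide
    by_cases h5 : d = '\''
    · subst h5; decide
    simp [escCh, h1, h2, h3, h4, h5]

-- split on '\n' as a structural recursion
def splitNL : List Char → List (List Char)
  | [] => [[]]
  | c :: t => if c = '\n' then [] :: splitNL t else (splitNL t).modifyHead (c :: ·)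

lemma splitNL_ne_nil (s : List Char) : splitNL s ≠ [] := by
  cases s with
  | nil => simp [splitNL]
  | cons c t =>
    simp only [splitNL]
    split
    · simp
    · cases h : splitNL t with
      | nil => exact absurd h (splitNL_ne_nil t)
      | cons a b => simp [List.modifyHead]

lemma splitOn_go_nl :
    ∀ (s : List Char) (fuel : Nat) (cur : List Char) (acc : List (List Char)), s.length ≤ fuel →
      PySem.Chars.splitOn.go ['\n'] fuel s cur acc
        = acc.reverse ++ (splitNL s).modifyHead (cur.reverse ++ ·) := by
  intro s
  induction s with
  | nil => intro fuel cur acc _; cases fuel <;> simp [PySem.Chars.splitOn.go, splitNL]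
  | cons c t ih =>
    intro fuel cur acc hle
    cases fuel with
    | zero => simp at hle
    | succ f =>
      rw [PySem.Chars.splitOn.go]
      by_cases hc : c = '\n'
      · subst hc
        have hpre : List.isPrefixOf ['\n'] ('\n' :: t) = true := by simp [List.isPrefixOf]
        rw [if_pos hpre]
        simp only [List.length_cons, List.length_nil, List.drop_succ_cons, List.drop_zero]
        rw [ih _ _ _ (by simpa using Nat.le_of_succ_le_succ hle)]
        simp only [splitNL, List.modifyHead_cons]
        cases splitNL t <;> simp [List.modifyHead]
      · have hpre : List.isPrefixOf ['\n'] (c :: t) = false := by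
          simp [List.isPrefixOf]; exact fun h => (hc h.symm).elim
        rw [if_neg (by simp [hpre])]
        rw [ih _ _ _ (by simpa using Nat.le_of_succ_le_succ hle)]
        rcases h : splitNL t with _ | ⟨h0, tl⟩
        · exact absurd h (splitNL_ne_nil t)
        · simp [splitNL, hc, h, List.modifyHead]

lemma splitOn_nl (s : List Char) : PySem.Chars.splitOn s ['\n'] = splitNL s := by
  rw [PySem.Chars.splitOn]
  rw [splitOn_go_nl s (s.length + 1) [] [] (by omega)]
  rcases h : splitNL s with _ | ⟨h0, tl⟩
  · exact absurd h (splitNL_ne_nil s)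
  · simp [List.modifyHead]

-- facts about escCh
lemma escCh_ws {c : Char} (h : PySem.Chars.isspace c = true) : escCh c = [c] := by
  rw [escCh]
  by_cases h1 : c = '&'; · subst h1; simp [PySem.Chars.isspace] at h
  by_cases h2 : c = '<'; · subst h2; simp [PySem.Chars.isspace] at h
  by_cases h3 : c = '>'; · subst h3; simp [PySem.Chars.isspace] at h
  by_cases h4 : c = '"'; · subst h4; simp [PySem.Chars.isspace] at h
  by_cases h5 : c = '\''; · subst h5; simp [PySem.Chars.isspace] at h
  simp [h1, h2, h3, h4, h5]

lemma escCh_head_nonspace {c : Char} (h : PySem.Chars.isspace c = false) :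
    ∃ a rest, escCh c = a :: rest ∧ PySem.Chars.isspace a = false := by
  by_cases h1 : c = '&'; · subst h1; exact ⟨'&', ['a','m','p',';'], by decide, by decide⟩
  by_cases h2 : c = '<'; · subst h2; exact ⟨'&', ['l','t',';'], by decide, by decide⟩
  by_cases h3 : c = '>'; · subst h3; exact ⟨'&', ['g','t',';'], by decide, by decide⟩
  by_cases h4 : c = '"'; · subst h4; exact ⟨'&', ['q','u','o','t',';'], by decide, by decide⟩
  by_cases h5 : c = '\''; · subst h5; exact ⟨'&', ['#','3','9',';'], by decide, by decide⟩
  exact ⟨c, [], by simp [escCh, h1, h2, h3, h4, h5], h⟩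

lemma escCh_no_nl {c : Char} (h : c ≠ '\n') : '\n' ∉ escCh c := by
  rw [escCh]
  by_cases h1 : c = '&'; · subst h1; decide
  by_cases h2 : c = '<'; · subst h2; decide
  by_cases h3 : c = '>'; · subst h3; decide
  by_cases h4 : c = '"'; · subst h4; decide
  by_cases h5 : c = '\''; · subst h5; decide
  simp [h1, h2, h3, h4, h5, Ne.symm h]

-- splitNL over a newline-free prefix
lemma splitNL_append_no_nl :
    ∀ (u v : List Char), '\n' ∉ u →
      splitNL (u ++ v) = (splitNL v).modifyHead (u ++ ·) := by
  intro u
  induction u with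
  | nil =>
    intro v _
    cases h : splitNL v with
    | nil => exact absurd h (splitNL_ne_nil v)
    | cons a b => simp [h, List.modifyHead]
  | cons a u ih =>
    intro v hnl
    have ha : a ≠ '\n' := fun h => hnl (h ▸ List.mem_cons_self)
    have hu : '\n' ∉ u := fun h => hnl (List.mem_cons_of_mem a h)
    simp only [List.cons_append, splitNL, if_neg ha, ih v hu]
    cases h : splitNL v with
    | nil => exact absurd h (splitNL_ne_nil v)
    | cons x b => simp [List.modifyHead]

lemma splitNL_flatMap (cs : List Char) :
    splitNL (cs.flatMap escCh) = (splitNL cs).map (List.flatMap escCh) := by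
  induction cs with
  | nil => simp [splitNL]
  | cons c t ih =>
    by_cases hc : c = '\n'
    · subst hc
      have : escCh '\n' = ['\n'] := by decide
      simp only [List.flatMap_cons, this, List.singleton_append, splitNL, ih,
        List.map_cons, List.flatMap_nil]
      simp
    · simp only [List.flatMap_cons]
      rw [splitNL_append_no_nl _ _ (escCh_no_nl hc), ih]
      simp only [splitNL, if_neg hc]
      cases h : splitNL t with
      | nil => exact absurd h (splitNL_ne_nil t)
      | cons x b => simp [List.modifyHead]

-- the per-line formatter that A applies to each escaped line
def gLine (l : List Char) : List Char :=
  let el := l.flatMap escCh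
  let stripped := PySem.Chars.lstrip el
  PySem.List.pyRepeat "&nbsp;".toList
      (((PySem.Chars.len el : Int) - (PySem.Chars.len stripped : Int)) * 2) ++ stripped

-- reference single-pass recursion (B's loop, structurally)
def bRef : List Char → Bool → List Char
  | [], _ => []
  | c :: t, b =>
    if c = '\n' then "<br>".toList ++ bRef t true
    else if b && PySem.Chars.isspace c then "&nbsp;&nbsp;".toList ++ bRef t true
    else escCh c ++ bRef t false

lemma join_empty_sep (ps : List (List Char)) : PySem.Chars.join [] ps = ps.flatten := by
  simp [PySem.Chars.join, List.intercalate]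
  induction ps with
  | nil => simp
  | cons a t ih => cases t <;> simp_all [List.intersperse]

lemma foldB (cs : List Char) :
    ∀ (parts : List (List Char)) (b : Bool),
      ((cs.foldl nl2brStep (parts, b)).1).flatten = parts.flatten ++ bRef cs b := by
  induction cs with
  | nil => intro parts b; simp [bRef]
  | cons c t ih =>
    intro parts b
    by_cases hc : c = '\n'
    · subst hc
      simp only [List.foldl_cons, nl2brStep, if_pos rfl, ih, bRef]
      simp
    · by_cases hws : b && PySem.Chars.isspace c
      · simp only [List.foldl_cons, nl2brStep, if_neg hc, if_pos hws, ih]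
        simp [bRef, hc, hws]
      · simp only [List.foldl_cons, nl2brStep, if_neg hc, if_neg hws, ih]
        simp [bRef, hc, hws]

-- per-line facts
lemma nbsp_repeat_succ (k : Nat) :
    PySem.List.pyRepeat "&nbsp;".toList (((k + 1 : Nat) : Int) * 2)
      = "&nbsp;&nbsp;".toList ++ PySem.List.pyRepeat "&nbsp;".toList ((k : Nat) * 2) := by
  simp only [PySem.List.pyRepeat]
  have h1 : (((k + 1 : Nat) : Int) * 2).toNat = 2 * k + 2 := by omega
  have h2 : (((k : Nat) : Int) * 2).toNat = 2 * k := by omega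
  rw [h1, h2]
  rw [show 2 * k + 2 = (2 * k).succ.succ from rfl]
  simp [List.replicate_succ]

lemma gLine_cons_ws {c : Char} (h : PySem.Chars.isspace c = true) (l : List Char) :
    gLine (c :: l) = "&nbsp;&nbsp;".toList ++ gLine l := by
  simp only [gLine, List.flatMap_cons, escCh_ws h, List.singleton_append]
  rw [show PySem.Chars.lstrip (c :: l.flatMap escCh) = PySem.Chars.lstrip (l.flatMap escCh) by
    simp [PySem.Chars.lstrip, List.dropWhile, h]]
  simp only [PySem.Chars.len_eq, List.length_cons]
  have hm : (PySem.Chars.lstrip (l.flatMap escCh)).length ≤ (l.flatMap escCh).length := by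
    simp only [PySem.Chars.lstrip]; exact List.length_dropWhile_le _ _
  set k := (l.flatMap escCh).length with hk
  set m := (PySem.Chars.lstrip (l.flatMap escCh)).length with hmm
  have e1 : (((k + 1 : Nat) : Int) - (m : Int)) * 2 = (((k - m + 1 : Nat) : Int)) * 2 := by
    push_cast; omega
  have e2 : (((k : Nat) : Int) - (m : Int)) * 2 = (((k - m : Nat) : Int)) * 2 := by
    push_cast; omega
  rw [e1, e2, nbsp_repeat_succ]
  simp

lemma lstrip_nonws_head {a : Char} (ha : PySem.Chars.isspace a = false) (t : List Char) :
    PySem.Chars.lstrip (a :: t) = a :: t := by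
  simp [PySem.Chars.lstrip, List.dropWhile, ha]

lemma gLine_cons_nonws {c : Char} (h : PySem.Chars.isspace c = false) (l : List Char) :
    gLine (c :: l) = escCh c ++ l.flatMap escCh := by
  obtain ⟨a, rest, he, ha⟩ := escCh_head_nonspace h
  simp only [gLine, List.flatMap_cons, he, List.cons_append]
  rw [lstrip_nonws_head ha]
  rw [show ((PySem.Chars.len (a :: (rest ++ l.flatMap escCh)) : Int)
      - (PySem.Chars.len (a :: (rest ++ l.flatMap escCh)) : Int)) * 2 = 0 by ring]
  simp [PySem.List.pyRepeat]

lemma gLine_nil : gLine [] = [] := by decide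

-- the head of the output line list, depending on the at_start flag
def linesOut (b : Bool) : List (List Char) → List (List Char)
  | [] => []
  | h :: t => (if b then gLine h else h.flatMap escCh) :: t.map gLine

lemma inter_cons_cons (br x y : List Char) (M : List (List Char)) :
    br.intercalate (x :: y :: M) = x ++ br ++ br.intercalate (y :: M) := by
  simp [List.intercalate]

lemma linesOut_true_map (l : List (List Char)) : linesOut true l = l.map gLine := by
  cases l <;> simp [linesOut]

lemma main_ref (cs : List Char) :
    ∀ b, bRef cs b = "<br>".toList.intercalate (linesOut b (splitNL cs)) := by
  induction cs with
  | nil =>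
    intro b
    cases b <;> simp [bRef, splitNL, linesOut, gLine_nil, List.intercalate]
  | cons c t ih =>
    intro b
    by_cases hc : c = '\n'
    · subst hc
      rw [show bRef ('\n' :: t) b = "<br>".toList ++ bRef t true from by
        cases b <;> simp [bRef]]
      rw [ih true, linesOut_true_map]
      rw [show splitNL ('\n' :: t) = [] :: splitNL t from by simp [splitNL]]
      rcases hsp : splitNL t with _ | ⟨h0, tl⟩
      · exact absurd hsp (splitNL_ne_nil t)
      rw [show linesOut b ([] :: h0 :: tl) = [] :: gLine h0 :: tl.map gLine from by
        cases b <;> simp [linesOut, gLine_nil]]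
      rw [inter_cons_cons]
      simp
    · rcases hsp : splitNL t with _ | ⟨h0, tl⟩
      · exact absurd hsp (splitNL_ne_nil t)
      have hsplit : splitNL (c :: t) = (c :: h0) :: tl := by
        simp [splitNL, hc, hsp, List.modifyHead]
      by_cases hws : b && PySem.Chars.isspace c
      · obtain ⟨hb, hsc⟩ := Bool.and_eq_true_iff.mp hws
        subst hb
        rw [show bRef (c :: t) true = "&nbsp;&nbsp;".toList ++ bRef t true from by
          simp [bRef, hc, hsc]]
        rw [ih true, linesOut_true_map, hsplit, hsp]
        rw [show linesOut true ((c :: h0) :: tl) = gLine (c :: h0) :: tl.map gLine from by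
          simp [linesOut]]
        rw [gLine_cons_ws hsc]
        cases tl with
        | nil => simp [List.intercalate]
        | cons x xs =>
          simp only [List.map_cons]
          rw [inter_cons_cons, inter_cons_cons]
          simp
      · have hhead : (if b = true then gLine (c :: h0) else (c :: h0).flatMap escCh)
            = escCh c ++ h0.flatMap escCh := by
          cases b with
          | false => simp
          | true =>
            have hsc : PySem.Chars.isspace c = false := by
              cases hx : PySem.Chars.isspace c
              · rfl
              · simp [hx] at hws
            simp [gLine_cons_nonws hsc]
        rw [show bRef (c :: t) b = escCh c ++ bRef t false from by
          rcases b <;> simp_all [bRef, hc]]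
        rw [ih false, hsp, hsplit]
        rw [show linesOut false (h0 :: tl) = h0.flatMap escCh :: tl.map gLine from by
          simp [linesOut]]
        rw [show linesOut b ((c :: h0) :: tl) = (escCh c ++ h0.flatMap escCh) :: tl.map gLine
          from by simp only [linesOut, hhead]]
        cases tl with
        | nil => simp [List.intercalate]
        | cons x xs =>
          simp only [List.map_cons]
          rw [inter_cons_cons, inter_cons_cons]
          simp

-- ===== VERDICT (by name: the statement is the Claim_ definition above) =====
theorem nl2br_py_spec : Claim_equal_nl2br_py := by
  intro text _
  unfold Spec_nl2br_py nl2br_py nl2br_py_alt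
  by_cases h : text.toList = []
  · rw [if_pos h, h]
    simp [PySem.Chars.join, List.intercalate]
  · rw [if_neg h]
    apply congrArg String.ofList
    rw [PySem.List.foldl_append_singleton_eq_map]
    rw [show "\n".toList = ['\n'] from by decide]
    rw [escape_flatMap, splitOn_nl, splitNL_flatMap, List.map_map]
    rw [join_empty_sep, foldB, main_ref, linesOut_true_map]
    rw [show PySem.Chars.join "<br>".toList ([] ++ (splitNL text.toList).map
        ((fun line => PySem.List.pyRepeat "&nbsp;".toList
            ((PySem.Chars.len line - PySem.Chars.len (PySem.Chars.lstrip line)) * 2)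
          ++ PySem.Chars.lstrip line) ∘ List.flatMap escCh))
        = "<br>".toList.intercalate ((splitNL text.toList).map
            ((fun line => PySem.List.pyRepeat "&nbsp;".toList
                ((PySem.Chars.len line - PySem.Chars.len (PySem.Chars.lstrip line)) * 2)
              ++ PySem.Chars.lstrip line) ∘ List.flatMap escCh)) from by
      simp [PySem.Chars.join]]
    congr 1
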